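-- pv_equiv track=rewrite | github.com/mmiles2012/Virgin-AI-OPS-prototype | aino_platform_audit/python_scripts/visa_requirements_system.py | find_visa_requirement
-- ===== SOURCE A (Python) =====
-- def find_visa_requirement(passport_data, destination):
--     """Find visa requirement with fuzzy matching"""
--     if not passport_data:
--         return None
--
--     # Direct match first
--     for entry in passport_data:
--         if destination.lower() in entry.get("destination", "").lower():
--             return entry
--
--     # Fuzzy match with target countries
--     for entry in passport_data:
--         if destination.lower() in entry.get("target_match", "").lower():
--             return entry
--
--     return None
-- ===== SOURCE B (Python) =====
-- def find_visa_requirement(passport_data, destination):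
--     """Find visa requirement with fuzzy matching (single pass)."""
--     d = destination.lower()
--     fuzzy = None
--     for entry in passport_data:
--         if d in entry.get("destination", "").lower():
--             return entry
--         if fuzzy is None and d in entry.get("target_match", "").lower():
--             fuzzy = entry
--     return fuzzy
-- ===== Notes on version B (the rewrite author's own statement) =====
-- stated objective: faster
-- what changed: Fuses A's two priority passes into one traversal that returns the first direct match immediately and remembers only the first fuzzy match in a variable, with destination.lower() computed once.
import Mathlib
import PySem

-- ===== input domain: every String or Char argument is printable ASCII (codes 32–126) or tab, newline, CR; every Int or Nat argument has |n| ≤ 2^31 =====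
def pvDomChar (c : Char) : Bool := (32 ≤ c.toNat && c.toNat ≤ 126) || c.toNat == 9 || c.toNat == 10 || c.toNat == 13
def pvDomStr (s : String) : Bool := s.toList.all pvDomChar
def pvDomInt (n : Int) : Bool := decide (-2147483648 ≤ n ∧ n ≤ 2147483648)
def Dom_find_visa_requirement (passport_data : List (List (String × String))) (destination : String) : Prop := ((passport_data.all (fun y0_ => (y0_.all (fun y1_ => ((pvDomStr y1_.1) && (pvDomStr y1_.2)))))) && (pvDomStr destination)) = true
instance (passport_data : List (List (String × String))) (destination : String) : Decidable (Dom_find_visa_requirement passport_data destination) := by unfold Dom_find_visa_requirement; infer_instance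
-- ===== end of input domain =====

-- B fuses A's two priority passes into one traversal with a single remembered fuzzy match (objective: simpler).

-- entry.get(k, "") on the association-list encoding of a dict (first match wins)
def fvrGet (entry : List (String × String)) (k : String) : String :=
  match entry.find? (fun p => p.1 == k) with
  | some p => p.2
  | none => ""

-- destination.lower() in entry.get(k, "").lower()
def fvrMatch (entry : List (String × String)) (k : String) (dl : String) : Bool :=
  PySem.Str.isIn dl (PySem.Str.lower (fvrGet entry k))

-- ===== PORT A =====
-- two passes: first direct matches, then fuzzy matches
def find_visa_requirement (passport_data : List (List (String × String))) (destination : String) : Option (List (String × String)) :=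
  if passport_data = [] then none
  else
    match passport_data.find? (fun entry => fvrMatch entry "destination" (PySem.Str.lower destination)) with
    | some entry => some entry
    | none => passport_data.find? (fun entry => fvrMatch entry "target_match" (PySem.Str.lower destination))

-- ===== PORT B =====
-- single pass carrying the first fuzzy match in `fuzzy`
def fvrAltGo (dl : String) (fuzzy : Option (List (String × String))) :
    List (List (String × String)) → Option (List (String × String))
  | [] => fuzzy
  | entry :: rest =>
    if fvrMatch entry "destination" dl then some entry
    else fvrAltGo dl (if fuzzy.isNone && fvrMatch entry "target_match" dl then some entry else fuzzy) rest

def find_visa_requirement_alt (passport_data : List (List (String × String))) (destination : String) : Option (List (String × String)) :=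
  fvrAltGo (PySem.Str.lower destination) none passport_data

-- ===== PRECONDITION & SPEC =====
def Spec_find_visa_requirement (passport_data : List (List (String × String))) (destination : String) (out : Option (List (String × String))) : Prop := out = find_visa_requirement_alt passport_data destination
instance (passport_data : List (List (String × String))) (destination : String) (out : Option (List (String × String))) : Decidable (Spec_find_visa_requirement passport_data destination out) := by unfold Spec_find_visa_requirement; infer_instance

-- ===== CLAIM (what is proved, stated in full; the proofs are below) =====
def Claim_equal_find_visa_requirement : Prop := ∀ (passport_data : List (List (String × String))) (destination : String), Dom_find_visa_requirement passport_data destination → Spec_find_visa_requirement passport_data destination (find_visa_requirement passport_data destination)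

-- ===== LEMMAS AND PROOFS =====

-- loop invariant of B: the one-pass loop equals "first direct match, else the carried fuzzy, else first fuzzy match"
theorem fvrAltGo_eq (dl : String) (fz : Option (List (String × String)))
    (pd : List (List (String × String))) :
    fvrAltGo dl fz pd =
      match pd.find? (fun entry => fvrMatch entry "destination" dl) with
      | some entry => some entry
      | none =>
        match fz with
        | some f => some f
        | none => pd.find? (fun entry => fvrMatch entry "target_match" dl) := by
  induction pd generalizing fz with
  | nil => cases fz <;> simp [fvrAltGo]
  | cons e rest ih =>
    by_cases hd : fvrMatch e "destination" dl
    · simp [fvrAltGo, hd, List.find?]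
    · cases fz with
      | some f => simp [fvrAltGo, hd, List.find?, ih]
      | none =>
        by_cases hf : fvrMatch e "target_match" dl <;>
          simp [fvrAltGo, hd, hf, List.find?, ih]

theorem find_visa_requirement_spec : Claim_equal_find_visa_requirement := by
  intro pd dest _
  show find_visa_requirement pd dest = find_visa_requirement_alt pd dest
  unfold find_visa_requirement find_visa_requirement_alt
  rw [fvrAltGo_eq]
  cases pd <;> simp
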